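-- pv_equiv track=rewrite | github.com/piyush5614/smartyplants | backend/services/ai_analyzer.py | _extract_diagnosis
-- ===== SOURCE A (Python) =====
-- def _extract_diagnosis(text: str) -> str:
--     """Extract disease diagnosis from response text."""
--     lines = text.split('\n')
--     for line in lines:
--         if 'disease' in line.lower() or 'diagnosis' in line.lower():
--             return line.strip()
--
--     # Return first non-empty line as fallback
--     for line in lines:
--         if line.strip():
--             return line.strip()
--
--     return "Unable to determine diagnosis"
-- ===== SOURCE B (Python) =====
-- def _extract_diagnosis(text: str) -> str:
--     """Single pass: return keyword line immediately, remember first non-empty line as fallback."""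
--     fallback = None
--     for line in text.split('\n'):
--         low = line.lower()
--         if 'disease' in low or 'diagnosis' in low:
--             return line.strip()
--         if fallback is None:
--             s = line.strip()
--             if s:
--                 fallback = s
--     return fallback if fallback is not None else "Unable to determine diagnosis"
-- ===== Notes on version B (the rewrite author's own statement) =====
-- stated objective: alternative
-- what changed: Replaces A's two sequential scans over the split lines with a single pass that returns on a keyword match and retains the first non-empty stripped line as a fallback used only after the loop.
import Mathlib
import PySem

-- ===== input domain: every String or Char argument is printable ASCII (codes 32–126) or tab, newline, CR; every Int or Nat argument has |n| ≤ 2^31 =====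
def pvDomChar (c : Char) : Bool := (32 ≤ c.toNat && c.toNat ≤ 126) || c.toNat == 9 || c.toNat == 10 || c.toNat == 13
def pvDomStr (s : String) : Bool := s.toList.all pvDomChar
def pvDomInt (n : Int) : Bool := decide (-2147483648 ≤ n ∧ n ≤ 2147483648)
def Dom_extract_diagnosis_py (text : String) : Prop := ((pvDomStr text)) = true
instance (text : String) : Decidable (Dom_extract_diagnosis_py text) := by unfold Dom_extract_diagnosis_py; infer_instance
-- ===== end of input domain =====

-- B merges A's two sequential scans into one pass with a retained fallback; equal result proved below.

-- ===== PORT A =====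
-- first loop: return line.strip() for the first line whose lower() contains a keyword
def pvA_loop1 : List String → Option String
  | [] => none
  | l :: ls =>
    if PySem.Str.isIn "disease" (PySem.Str.lower l) || PySem.Str.isIn "diagnosis" (PySem.Str.lower l) then
      some (PySem.Str.strip l)
    else pvA_loop1 ls

-- second loop: return the first non-empty stripped line
def pvA_loop2 : List String → Option String
  | [] => none
  | l :: ls =>
    if !(PySem.Str.strip l).isEmpty then some (PySem.Str.strip l) else pvA_loop2 ls

def extract_diagnosis_py (text : String) : String :=
  let lines := ((PySem.Str.split? text "\n").getD [])
  match pvA_loop1 lines with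
  | some s => s
  | none =>
    match pvA_loop2 lines with
    | some s => s
    | none => "Unable to determine diagnosis"

-- ===== PORT B =====
-- single loop carrying the fallback; keyword match returns immediately
def pvB_loop : List String → Option String → String
  | [], fallback => match fallback with | some f => f | none => "Unable to determine diagnosis"
  | l :: ls, fallback =>
    let low := PySem.Str.lower l
    if PySem.Str.isIn "disease" low || PySem.Str.isIn "diagnosis" low then
      PySem.Str.strip l
    else if fallback.isNone then
      let s := PySem.Str.strip l
      if !s.isEmpty then pvB_loop ls (some s) else pvB_loop ls fallback
    else pvB_loop ls fallback

def extract_diagnosis_py_alt (text : String) : String :=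
  pvB_loop (((PySem.Str.split? text "\n").getD [])) none

-- ===== PRECONDITION & SPEC =====
def Spec_extract_diagnosis_py (text : String) (out : String) : Prop := out = extract_diagnosis_py_alt text
instance (text : String) (out : String) : Decidable (Spec_extract_diagnosis_py text out) := by unfold Spec_extract_diagnosis_py; infer_instance

-- ===== CLAIM (what is proved, stated in full; the proofs are below) =====
def Claim_equal_extract_diagnosis_py : Prop := ∀ (text : String), Dom_extract_diagnosis_py text → Spec_extract_diagnosis_py text (extract_diagnosis_py text)

-- ===== LEMMAS AND PROOFS =====
theorem pvB_loop_eq (ls : List String) (fb : Option String) :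
    pvB_loop ls fb =
      match pvA_loop1 ls with
      | some s => s
      | none =>
        match fb with
        | some f => f
        | none =>
          match pvA_loop2 ls with
          | some s => s
          | none => "Unable to determine diagnosis" := by
  induction ls generalizing fb with
  | nil => cases fb <;> simp [pvB_loop, pvA_loop1, pvA_loop2]
  | cons l ls ih =>
    simp only [pvB_loop, pvA_loop1, pvA_loop2]
    by_cases h : (PySem.Str.isIn "disease" (PySem.Str.lower l) || PySem.Str.isIn "diagnosis" (PySem.Str.lower l)) = true
    · rw [if_pos h, if_pos h]
    · rw [if_neg h, if_neg h]
      cases fb with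
      | some f => simp [ih]
      | none =>
        by_cases h2 : (PySem.Str.strip l).isEmpty = true
        · simp [h2, ih]
        · simp [h2, ih]

-- ===== VERDICT (by name: the statement is the Claim_ definition above) =====
theorem extract_diagnosis_py_spec : Claim_equal_extract_diagnosis_py := by
  intro text _
  unfold Spec_extract_diagnosis_py extract_diagnosis_py extract_diagnosis_py_alt
  rw [pvB_loop_eq]
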